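-- pv_equiv track=rewrite | github.com/ase12345636/2025-TCGA-Dot-and-Box | dot&box-zero-master/random_bot/RandomBot.py | check_suicide
-- ===== SOURCE A (Python) =====
-- def check_suicide(next_board):
--     box_filled = False
--     box_filled = False
--     m = (len(next_board)+1)//2
--     n = (len(next_board[0])+1)//2
--     for i in range(m - 1):
--         for j in range(n - 1):
--             box_i = 2*i + 1
--             box_j = 2*j + 1
--             # 檢查該方格的四條邊是否都不為 0
--             if (next_board[box_i][box_j] == 8 and
--                 next_board[box_i-1][box_j] == 0 and
--                 next_board[box_i+1][box_j] != 0 and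
--                 next_board[box_i][box_j-1] != 0 and
--                     next_board[box_i][box_j+1] != 0):
--                 box_filled = True
--             if (next_board[box_i][box_j] == 8 and
--                 next_board[box_i-1][box_j] != 0 and
--                 next_board[box_i+1][box_j] == 0 and
--                 next_board[box_i][box_j-1] != 0 and
--                     next_board[box_i][box_j+1] != 0):
--                 box_filled = True
--
--             if (next_board[box_i][box_j] == 8 and
--                 next_board[box_i-1][box_j] != 0 and
--                 next_board[box_i+1][box_j] != 0 and
--                 next_board[box_i][box_j-1] == 0 and
--                     next_board[box_i][box_j+1] != 0):
--                 box_filled = True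
--
--             if (next_board[box_i][box_j] == 8 and
--                 next_board[box_i-1][box_j] != 0 and
--                 next_board[box_i+1][box_j] != 0 and
--                 next_board[box_i][box_j-1] != 0 and
--                     next_board[box_i][box_j+1] == 0):
--                 box_filled = True
--
--     return box_filled
-- ===== SOURCE B (Python) =====
-- def check_suicide(next_board):
--     width = len(next_board[0])
--
--     def scan_cols(up, mid, down):
--         # slide a 3-wide window two columns at a time over one row of boxes
--         if len(up) < 3 or len(mid) < 3 or len(down) < 3:
--             return False
--         filled = (up[1] != 0) + (down[1] != 0) + (mid[0] != 0) + (mid[2] != 0)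
--         if mid[1] == 8 and filled == 3:
--             return True
--         return scan_cols(up[2:], mid[2:], down[2:])
--
--     def scan_rows(rows):
--         # slide a 3-high window two rows at a time over the rows of boxes
--         if len(rows) < 3:
--             return False
--         return (scan_cols(rows[0][:width], rows[1][:width], rows[2][:width])
--                 or scan_rows(rows[2:]))
--
--     return scan_rows(next_board)
-- ===== Notes on version B (the rewrite author's own statement) =====
-- stated objective: alternative
-- what changed: Replaces A's index-arithmetic double loop (m,n computed by floor division, four explicit case branches setting a flag) with a recursive sliding-window traversal: a 3-row window advanced two rows at a time, and inside it a 3-column window advanced two columns at a time, testing center==8 with exactly three filled edges and exiting early.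
-- outside the precondition, e.g. on check_suicide([[1, 1, 1, 1, 1], [1, 0, 0, 8, 1], [1, 1, 1, 1]]): A returns True, B returns False
import Mathlib
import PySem

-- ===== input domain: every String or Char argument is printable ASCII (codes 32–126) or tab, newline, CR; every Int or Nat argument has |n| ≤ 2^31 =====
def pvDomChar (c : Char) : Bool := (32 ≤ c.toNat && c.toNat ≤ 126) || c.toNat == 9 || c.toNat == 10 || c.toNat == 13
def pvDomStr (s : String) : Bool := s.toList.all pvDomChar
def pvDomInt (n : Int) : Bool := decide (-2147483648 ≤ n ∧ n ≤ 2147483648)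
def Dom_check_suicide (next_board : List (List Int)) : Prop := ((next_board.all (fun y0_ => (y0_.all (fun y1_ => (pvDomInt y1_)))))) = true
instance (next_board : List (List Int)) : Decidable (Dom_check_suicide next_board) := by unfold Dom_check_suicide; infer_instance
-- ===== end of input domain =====

-- B replaces A's index-arithmetic double loop and four case branches with a recursive
-- sliding-window traversal (3-row window stepped by 2, inside it a 3-column window stepped
-- by 2, early exit on center == 8 with exactly three filled edges); objective: alternative.

-- ===== PORT A =====
def check_suicide (next_board : List (List Int)) : Bool :=
  let m : Int := PySem.Int.floordiv (PySem.List.len next_board + 1) 2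
  let n : Int := PySem.Int.floordiv (PySem.List.len (PySem.List.pyGetD next_board 0 []) + 1) 2
  let cell : Int → Int → Int := fun r c => PySem.List.pyGetD (PySem.List.pyGetD next_board r []) c 0
  (PySem.List.pyRange 0 (m - 1) 1).foldl (fun box_filled i =>
    (PySem.List.pyRange 0 (n - 1) 1).foldl (fun box_filled j =>
      let box_i := 2 * i + 1
      let box_j := 2 * j + 1
      let box_filled := if cell box_i box_j == 8 && cell (box_i - 1) box_j == 0 &&
          !(cell (box_i + 1) box_j == 0) && !(cell box_i (box_j - 1) == 0) &&
          !(cell box_i (box_j + 1) == 0) then true else box_filled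
      let box_filled := if cell box_i box_j == 8 && !(cell (box_i - 1) box_j == 0) &&
          cell (box_i + 1) box_j == 0 && !(cell box_i (box_j - 1) == 0) &&
          !(cell box_i (box_j + 1) == 0) then true else box_filled
      let box_filled := if cell box_i box_j == 8 && !(cell (box_i - 1) box_j == 0) &&
          !(cell (box_i + 1) box_j == 0) && cell box_i (box_j - 1) == 0 &&
          !(cell box_i (box_j + 1) == 0) then true else box_filled
      let box_filled := if cell box_i box_j == 8 && !(cell (box_i - 1) box_j == 0) &&
          !(cell (box_i + 1) box_j == 0) && !(cell box_i (box_j - 1) == 0) &&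
          cell box_i (box_j + 1) == 0 then true else box_filled
      box_filled) box_filled) false

-- ===== PORT B =====
-- Source B's scan_cols: a 3-wide window slid two columns at a time over one row of boxes
def pvScanCols : List Int → List Int → List Int → Bool
  | _u0 :: u1 :: u2 :: us, m0 :: m1 :: m2 :: ms, _d0 :: d1 :: d2 :: ds =>
      let filled : Int := (if u1 ≠ 0 then 1 else 0) + (if d1 ≠ 0 then 1 else 0) +
                          (if m0 ≠ 0 then 1 else 0) + (if m2 ≠ 0 then 1 else 0)
      if m1 == 8 && filled == 3 then true
      else pvScanCols (u2 :: us) (m2 :: ms) (d2 :: ds)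
  | _, _, _ => false

-- Source B's scan_rows: a 3-high window slid two rows at a time
def pvScanRows (width : Nat) : List (List Int) → Bool
  | r0 :: r1 :: r2 :: rest =>
      pvScanCols (r0.take width) (r1.take width) (r2.take width) ||
        pvScanRows width (r2 :: rest)
  | _ => false

def check_suicide_alt (next_board : List (List Int)) : Bool :=
  let width : Nat := (PySem.List.pyGetD next_board 0 []).length
  pvScanRows width next_board

-- ===== PRECONDITION & SPEC =====
-- Pre_ excludes the empty board (A raises IndexError on next_board[0]) and ragged boards in
-- which some accessed row is shorter than the box grid implied by row 0: there A either
-- raises IndexError or reads boxes whose 3-wide row window B's sliding pass cannot form.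
def Pre_check_suicide (next_board : List (List Int)) : Prop :=
  next_board ≠ [] ∧
  (2 ≤ (next_board.length + 1) / 2 →
   2 ≤ ((next_board.headD []).length + 1) / 2 →
   ∀ row ∈ next_board.take (2 * ((next_board.length + 1) / 2) - 1),
     2 * (((next_board.headD []).length + 1) / 2) - 1 ≤ row.length)
instance (next_board : List (List Int)) : Decidable (Pre_check_suicide next_board) := by
  unfold Pre_check_suicide; infer_instance

def pvWitness_check_suicide : List (List Int) :=
  [[0, 1, 0], [1, 8, 1], [0, 1, 0]]

def Spec_check_suicide (next_board : List (List Int)) (out : Bool) : Prop := out = check_suicide_alt next_board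
instance (next_board : List (List Int)) (out : Bool) : Decidable (Spec_check_suicide next_board out) := by unfold Spec_check_suicide; infer_instance

-- ===== CLAIM (what is proved, stated in full; the proofs are below) =====
def Claim_equal_check_suicide : Prop := ∀ (next_board : List (List Int)), Dom_check_suicide next_board → Pre_check_suicide next_board → Spec_check_suicide next_board (check_suicide next_board)

-- ===== LEMMAS AND PROOFS =====

-- the box predicate both programs decide: center == 8 and exactly three of the four edges filled
def pvQ (u d l r c : Int) : Bool :=
  c == 8 && ((if u ≠ 0 then (1:Int) else 0) + (if d ≠ 0 then 1 else 0) +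
             (if l ≠ 0 then 1 else 0) + (if r ≠ 0 then 1 else 0) == 3)

-- a fold that only ever turns its Boolean accumulator on is the `any` of the per-element test
theorem foldl_or_any {α : Type} (l : List α) (f : Bool → α → Bool) (p : α → Bool)
    (h : ∀ b x, f b x = (b || p x)) : ∀ b, l.foldl f b = (b || l.any p) := by
  induction l with
  | nil => simp
  | cons x xs ih => intro b; rw [List.foldl_cons, h, ih, List.any_cons, Bool.or_assoc]

-- A's four sequential branch-ifs on one box equal flag || pvQ of the four edges and the center
theorem box_step (cell : Int → Int → Int) (i j : Int) (b : Bool) :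
    (let box_i := 2 * i + 1
     let box_j := 2 * j + 1
     let b1 := if cell box_i box_j == 8 && cell (box_i - 1) box_j == 0 &&
         !(cell (box_i + 1) box_j == 0) && !(cell box_i (box_j - 1) == 0) &&
         !(cell box_i (box_j + 1) == 0) then true else b
     let b2 := if cell box_i box_j == 8 && !(cell (box_i - 1) box_j == 0) &&
         cell (box_i + 1) box_j == 0 && !(cell box_i (box_j - 1) == 0) &&
         !(cell box_i (box_j + 1) == 0) then true else b1
     let b3 := if cell box_i box_j == 8 && !(cell (box_i - 1) box_j == 0) &&
         !(cell (box_i + 1) box_j == 0) && cell box_i (box_j - 1) == 0 &&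
         !(cell box_i (box_j + 1) == 0) then true else b2
     if cell box_i box_j == 8 && !(cell (box_i - 1) box_j == 0) &&
         !(cell (box_i + 1) box_j == 0) && !(cell box_i (box_j - 1) == 0) &&
         cell box_i (box_j + 1) == 0 then true else b3) =
    (b || pvQ (cell (2 * i) (2 * j + 1)) (cell (2 * i + 2) (2 * j + 1))
              (cell (2 * i + 1) (2 * j)) (cell (2 * i + 1) (2 * j + 2))
              (cell (2 * i + 1) (2 * j + 1))) := by
  simp only [show (2 * i + 1 - 1 : Int) = 2 * i from by ring,
             show (2 * i + 1 + 1 : Int) = 2 * i + 2 from by ring,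
             show (2 * j + 1 - 1 : Int) = 2 * j from by ring,
             show (2 * j + 1 + 1 : Int) = 2 * j + 2 from by ring, pvQ]
  by_cases hc : cell (2 * i + 1) (2 * j + 1) = 8 <;>
    by_cases hu : cell (2 * i) (2 * j + 1) = 0 <;>
    by_cases hd : cell (2 * i + 2) (2 * j + 1) = 0 <;>
    by_cases hl : cell (2 * i + 1) (2 * j) = 0 <;>
    by_cases hr : cell (2 * i + 1) (2 * j + 2) = 0 <;>
    simp [hc, hu, hd, hl, hr]

-- pvScanCols finds a window iff some window position j satisfies pvQ
theorem pvScanCols_iff (up mid down : List Int) :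
    pvScanCols up mid down = true ↔
    ∃ j : Nat, 2*j+2 < up.length ∧ 2*j+2 < mid.length ∧ 2*j+2 < down.length ∧
      pvQ (up.getD (2*j+1) 0) (down.getD (2*j+1) 0) (mid.getD (2*j) 0)
          (mid.getD (2*j+2) 0) (mid.getD (2*j+1) 0) = true := by
  fun_induction pvScanCols up mid down with
  | case1 u0 u1 u2 us m0 m1 m2 ms d0 d1 d2 ds filled h =>
      have hf : filled = (if u1 ≠ 0 then (1:Int) else 0) + (if d1 ≠ 0 then 1 else 0) +
          (if m0 ≠ 0 then 1 else 0) + (if m2 ≠ 0 then 1 else 0) := rfl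
      rw [hf] at h
      refine iff_of_true rfl ⟨0, by simp, by simp, by simp, ?_⟩
      simpa [pvQ] using h
  | case2 u0 u1 u2 us m0 m1 m2 ms d0 d1 d2 ds filled h ih =>
      have hf : filled = (if u1 ≠ 0 then (1:Int) else 0) + (if d1 ≠ 0 then 1 else 0) +
          (if m0 ≠ 0 then 1 else 0) + (if m2 ≠ 0 then 1 else 0) := rfl
      rw [hf] at h
      rw [ih]
      constructor
      · rintro ⟨k, h1, h2, h3, hq⟩
        refine ⟨k+1, ?_, ?_, ?_, ?_⟩
        · simp at h1 ⊢; omega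
        · simp at h2 ⊢; omega
        · simp at h3 ⊢; omega
        · simpa [show 2*(k+1)+1 = (2*k+1)+2 from by ring,
                 show 2*(k+1) = (2*k)+2 from by ring,
                 show 2*(k+1)+2 = (2*k+2)+2 from by ring,
                 List.getD_cons_succ] using hq
      · rintro ⟨j, h1, h2, h3, hq⟩
        match j with
        | 0 => simp [pvQ] at hq; exact absurd (by simpa [pvQ] using hq) (by simpa [pvQ] using h)
        | k+1 =>
          refine ⟨k, ?_, ?_, ?_, ?_⟩
          · simp at h1 ⊢; omega
          · simp at h2 ⊢; omega
          · simp at h3 ⊢; omega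
          · simpa [show 2*(k+1)+1 = (2*k+1)+2 from by ring,
                   show 2*(k+1) = (2*k)+2 from by ring,
                   show 2*(k+1)+2 = (2*k+2)+2 from by ring,
                   List.getD_cons_succ] using hq
  | case3 t u v himp =>
      refine iff_of_false (by simp) ?_
      rintro ⟨j, h1, h2, h3, -⟩
      rcases t with _|⟨a1,_|⟨a2,_|⟨a3,ts⟩⟩⟩ <;> simp at h1
      rcases u with _|⟨b1,_|⟨b2,_|⟨b3,us⟩⟩⟩ <;> simp at h2
      rcases v with _|⟨c1,_|⟨c2,_|⟨c3,vs⟩⟩⟩ <;> simp at h3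
      exact himp _ _ _ _ _ _ _ _ _ _ _ _ rfl rfl rfl

-- pvScanRows finds a box row iff some window position i finds one
theorem pvScanRows_iff (w : Nat) (rows : List (List Int)) :
    pvScanRows w rows = true ↔
    ∃ i : Nat, 2*i+2 < rows.length ∧
      pvScanCols ((rows.getD (2*i) []).take w) ((rows.getD (2*i+1) []).take w)
                 ((rows.getD (2*i+2) []).take w) = true := by
  fun_induction pvScanRows w rows with
  | case1 r0 r1 r2 rest ih =>
      rw [Bool.or_eq_true, ih]
      constructor
      · rintro (h | ⟨k, h1, hs⟩)
        · exact ⟨0, by simp, by simpa using h⟩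
        · refine ⟨k+1, by simp at h1 ⊢; omega, ?_⟩
          simpa [show 2*(k+1) = (2*k)+2 from by ring,
                 show 2*(k+1)+1 = (2*k+1)+2 from by ring,
                 show 2*(k+1)+2 = (2*k+2)+2 from by ring,
                 List.getD_cons_succ] using hs
      · rintro ⟨j, h1, hs⟩
        match j with
        | 0 => exact Or.inl (by simpa using hs)
        | k+1 =>
          refine Or.inr ⟨k, by simp at h1 ⊢; omega, ?_⟩
          simpa [show 2*(k+1) = (2*k)+2 from by ring,
                 show 2*(k+1)+1 = (2*k+1)+2 from by ring,
                 show 2*(k+1)+2 = (2*k+2)+2 from by ring,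
                 List.getD_cons_succ] using hs
  | case2 t himp =>
      refine iff_of_false (by simp) ?_
      rintro ⟨j, h1, -⟩
      rcases t with _|⟨a1,_|⟨a2,_|⟨a3,ts⟩⟩⟩ <;> simp at h1
      exact himp _ _ _ _ rfl

-- ===== VERDICT (by name: the statement is the Claim_ definition above) =====
theorem check_suicide_spec : Claim_equal_check_suicide := by
  intro nb _ pre
  obtain ⟨hne, hrows⟩ := pre
  show check_suicide nb = check_suicide_alt nb

  -- names
  have hhead : nb.headD [] = nb.getD 0 [] := by cases nb <;> simp
  set L : Nat := nb.length with hL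
  set w : Nat := (nb.getD 0 []).length with hw
  set M : Nat := (L + 1) / 2 with hMdef
  set N : Nat := (w + 1) / 2 with hNdef
  set cell : Int → Int → Int :=
    fun r c => PySem.List.pyGetD (PySem.List.pyGetD nb r []) c 0 with hcell
  -- A as an `any` over the two ranges
  have hA : check_suicide nb =
      (PySem.List.pyRange 0 ((M:Int) - 1) 1).any (fun i =>
        (PySem.List.pyRange 0 ((N:Int) - 1) 1).any (fun j =>
          pvQ (cell (2*i) (2*j+1)) (cell (2*i+2) (2*j+1))
              (cell (2*i+1) (2*j)) (cell (2*i+1) (2*j+2)) (cell (2*i+1) (2*j+1)))) := by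
    have hm : PySem.Int.floordiv (PySem.List.len nb + 1) 2 = (M:Int) := by
      simp [PySem.List.len, hMdef, hL]
    have hn : PySem.Int.floordiv (PySem.List.len (PySem.List.pyGetD nb 0 []) + 1) 2 = (N:Int) := by
      simp [PySem.List.len, hNdef, hw, PySem.List.pyGetD_zero, List.getD]
    have h := foldl_or_any (PySem.List.pyRange 0 ((M:Int) - 1) 1) _
      (fun i => (PySem.List.pyRange 0 ((N:Int) - 1) 1).any (fun j =>
          pvQ (cell (2*i) (2*j+1)) (cell (2*i+2) (2*j+1))
              (cell (2*i+1) (2*j)) (cell (2*i+1) (2*j+2)) (cell (2*i+1) (2*j+1))))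
      (fun b i => foldl_or_any (PySem.List.pyRange 0 ((N:Int) - 1) 1) _ _
        (fun b' j => box_step cell i j b') b) false
    rw [Bool.false_or] at h
    show (PySem.List.pyRange 0 (PySem.Int.floordiv (PySem.List.len nb + 1) 2 - 1) 1).foldl _ false = _
    rw [hm, hn] at *
    exact h
  have hB : check_suicide_alt nb = pvScanRows w nb := by
    show pvScanRows (PySem.List.pyGetD nb 0 []).length nb = _
    rw [PySem.List.pyGetD_zero]
  have hwN : 2*N - 1 ≤ w ∧ w ≤ 2*N := by omega
  have hlen : ∀ k : Nat, 2 ≤ M → 2 ≤ N → k < L → k < 2*M-1 →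
      2*N-1 ≤ (nb.getD k []).length := by
    intro k hM2 hN2 hkL hkM
    have h1 : nb.getD k [] = nb[k] := List.getD_eq_getElem nb [] hkL
    have hk2 : k < (nb.take (2*M-1)).length := by
      rw [List.length_take]; omega
    have h3 : (nb.take (2*M-1))[k] = nb[k] := List.getElem_take
    have hg2 : 2 ≤ ((nb.headD []).length + 1)/2 := by rw [hhead]; omega
    have h4 := hrows hM2 hg2 nb[k] (by rw [← h3]; exact List.getElem_mem hk2)
    rw [hhead] at h4
    rw [h1]
    omega
  have htake : ∀ (l : List Int) (k : Nat), k < w → (l.take w).getD k 0 = l.getD k 0 := by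
    intro l k hk
    simp [List.getD, hk]
  have hcast : ∀ (x y : Nat), cell (x:Int) (y:Int) = (nb.getD x []).getD y 0 := by
    intro x y; simp [hcell]
  rw [hA, hB, Bool.eq_iff_iff, pvScanRows_iff]
  simp only [List.any_eq_true, PySem.List.mem_pyRange_one]
  constructor
  · rintro ⟨i, ⟨hi0, hi1⟩, j, ⟨hj0, hj1⟩, hq⟩
    obtain ⟨a, rfl⟩ : ∃ a:Nat, i = (a:Int) := ⟨i.toNat, (Int.toNat_of_nonneg hi0).symm⟩
    obtain ⟨b, rfl⟩ : ∃ b:Nat, j = (b:Int) := ⟨j.toNat, (Int.toNat_of_nonneg hj0).symm⟩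
    have haM : a < M - 1 := by omega
    have hbN : b < N - 1 := by omega
    have hM2 : 2 ≤ M := by omega
    have hN2 : 2 ≤ N := by omega
    have l0 := hlen (2*a) hM2 hN2 (by omega) (by omega)
    have l1 := hlen (2*a+1) hM2 hN2 (by omega) (by omega)
    have l2 := hlen (2*a+2) hM2 hN2 (by omega) (by omega)
    refine ⟨a, by omega, ?_⟩
    rw [pvScanCols_iff]
    refine ⟨b, ?_, ?_, ?_, ?_⟩
    · rw [List.length_take]; omega
    · rw [List.length_take]; omega
    · rw [List.length_take]; omega
    · rw [htake _ _ (by omega), htake _ _ (by omega), htake _ _ (by omega),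
          htake _ _ (by omega), htake _ _ (by omega)]
      simp only [show (2*(a:Int)) = ((2*a : Nat) : Int) from by push_cast; ring,
                 show (((2*a : Nat) : Int)+1) = ((2*a+1 : Nat) : Int) from by push_cast; ring,
                 show (((2*a : Nat) : Int)+2) = ((2*a+2 : Nat) : Int) from by push_cast; ring,
                 show (2*(b:Int)) = ((2*b : Nat) : Int) from by push_cast; ring,
                 show (((2*b : Nat) : Int)+1) = ((2*b+1 : Nat) : Int) from by push_cast; ring,
                 show (((2*b : Nat) : Int)+2) = ((2*b+2 : Nat) : Int) from by push_cast; ring,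
                 hcast] at hq
      exact hq
  · rintro ⟨a, ha, hs⟩
    rw [pvScanCols_iff] at hs
    obtain ⟨b, hb1, hb2, hb3, hq⟩ := hs
    rw [List.length_take] at hb1 hb2 hb3
    have hN2 : 2 ≤ N := by omega
    have hbN : b < N - 1 := by omega
    have hM2 : 2 ≤ M := by omega
    rw [htake _ _ (by omega), htake _ _ (by omega), htake _ _ (by omega),
        htake _ _ (by omega), htake _ _ (by omega)] at hq
    refine ⟨(a:Int), ⟨by omega, by omega⟩, (b:Int), ⟨by omega, by omega⟩, ?_⟩
    simp only [show (2*(a:Int)) = ((2*a : Nat) : Int) from by push_cast; ring,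
               show (((2*a : Nat) : Int)+1) = ((2*a+1 : Nat) : Int) from by push_cast; ring,
               show (((2*a : Nat) : Int)+2) = ((2*a+2 : Nat) : Int) from by push_cast; ring,
               show (2*(b:Int)) = ((2*b : Nat) : Int) from by push_cast; ring,
               show (((2*b : Nat) : Int)+1) = ((2*b+1 : Nat) : Int) from by push_cast; ring,
               show (((2*b : Nat) : Int)+2) = ((2*b+2 : Nat) : Int) from by push_cast; ring,
               hcast]
    exact hq
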